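-- pv_equiv track=rewrite | github.com/Tuntiii/Booleans | task8.py | lone_sum
-- ===== SOURCE A (Python) =====
-- def lone_sum(a, b, c):
--   listt=[a,b,c]
--   summ=0
--
--   d=[listt.count(a), listt.count(b), listt.count(c)]
--
--   for i in range(0,3):
--     if d[i] > 1:
--       continue
--     else:
--       summ+=listt[i]
--
--   return summ
-- ===== SOURCE B (Python) =====
-- def lone_sum(a, b, c):
--   if a == b == c:
--     return 0
--   elif a == b:
--     return c
--   elif a == c:
--     return b
--   elif b == c:
--     return a
--   else:
--     return a + b + c
-- ===== Notes on version B (the rewrite author's own statement) =====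
-- stated objective: simpler
-- what changed: Replaced the count-list build and index loop with a direct four-way equality case analysis returning the answer in closed form.
import Mathlib
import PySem

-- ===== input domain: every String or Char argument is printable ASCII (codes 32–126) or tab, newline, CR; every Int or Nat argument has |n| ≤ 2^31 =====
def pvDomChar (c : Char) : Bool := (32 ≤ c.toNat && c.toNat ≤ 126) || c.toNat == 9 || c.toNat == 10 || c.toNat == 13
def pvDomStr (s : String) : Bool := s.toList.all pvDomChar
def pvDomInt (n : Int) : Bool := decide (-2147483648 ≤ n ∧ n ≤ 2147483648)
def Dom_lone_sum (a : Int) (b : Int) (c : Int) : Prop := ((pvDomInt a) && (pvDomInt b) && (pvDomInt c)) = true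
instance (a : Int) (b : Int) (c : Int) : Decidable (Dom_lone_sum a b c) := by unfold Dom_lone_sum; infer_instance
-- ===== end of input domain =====

-- B replaces A's count-list and index loop by a direct equality case analysis (objective: simpler).


-- ===== PORT A =====
def lone_sum (a : Int) (b : Int) (c : Int) : Int :=
  let listt : List Int := [a, b, c]
  let summ : Int := 0
  let d : List Int := [PySem.List.count listt a, PySem.List.count listt b, PySem.List.count listt c]
  (PySem.List.pyRange 0 3 1).foldl (fun summ i =>
    if PySem.List.pyGetD d i 0 > 1 then summ
    else summ + PySem.List.pyGetD listt i 0) summ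

-- ===== PORT B =====
def lone_sum_alt (a : Int) (b : Int) (c : Int) : Int :=
  if a = b ∧ b = c then 0
  else if a = b then c
  else if a = c then b
  else if b = c then a
  else a + b + c

-- ===== PRECONDITION & SPEC =====
def Spec_lone_sum (a : Int) (b : Int) (c : Int) (out : Int) : Prop := out = lone_sum_alt a b c
instance (a : Int) (b : Int) (c : Int) (out : Int) : Decidable (Spec_lone_sum a b c out) := by unfold Spec_lone_sum; infer_instance

-- ===== CLAIM (what is proved, stated in full; the proofs are below) =====
def Claim_equal_lone_sum : Prop := ∀ (a : Int) (b : Int) (c : Int), Dom_lone_sum a b c → Spec_lone_sum a b c (lone_sum a b c)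

-- ===== LEMMAS AND PROOFS =====

-- ===== VERDICT (by name: the statement is the Claim_ definition above) =====
theorem lone_sum_spec : Claim_equal_lone_sum := by
  intro a b c _
  unfold Spec_lone_sum lone_sum lone_sum_alt
  simp only [PySem.List.count, PySem.List.pyRange, PySem.List.pyGetD]
  by_cases hab : a = b <;> by_cases hac : a = c <;> by_cases hbc : b = c <;>
    simp [hab, hac, hbc, List.range_succ, List.count_cons] <;> omega
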